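-- pv_equiv track=rewrite | github.com/Sandy1811/Chatette | chatette/parsing/parser_utils.py | next_sub_rule_tokens
-- ===== SOURCE A (Python) =====
-- ALIAS_SYM = '~'
--
-- SLOT_SYM = '@'
--
-- INTENT_SYM = '%'
--
-- UNIT_OPEN_SYM = '['  # This shouldn't be changed
--
-- UNIT_CLOSE_SYM = ']'  # id.
--
-- CHOICE_OPEN_SYM = r'{'
--
-- CHOICE_CLOSE_SYM = r'}'
--
-- def next_sub_rule_tokens(tokens):
--     """
--     Yields the next sub-rule from a rule
--     represented as tokens (i.e. a list of str).
--     @pre: `tokens` represents a valid rule.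
--     """
--     current_sub_rule = []
--     stop_with_char = None
--     reading_sub_rule = False
--     for token in tokens:
--         if reading_sub_rule:
--             if token == stop_with_char:
--                 current_sub_rule.append(token)
--                 yield current_sub_rule
--                 current_sub_rule = []
--                 stop_with_char = None
--                 reading_sub_rule = False
--             else:
--                 current_sub_rule.append(token)
--         else:  # Looking for the start of a sub-rule
--             if is_start_unit_sym(token):  # Unit reference starting point
--                 current_sub_rule.append(token)
--                 reading_sub_rule = True
--                 stop_with_char = UNIT_CLOSE_SYM
--             elif token == UNIT_OPEN_SYM:  # Word group starting point
--                 current_sub_rule.append(token)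
--                 reading_sub_rule = True
--                 stop_with_char = UNIT_CLOSE_SYM
--             elif token == CHOICE_OPEN_SYM:  # Word group starting point
--                 current_sub_rule.append(token)
--                 reading_sub_rule = True
--                 stop_with_char = CHOICE_CLOSE_SYM
--             else:  # Word
--                 yield [token]
--
-- def is_start_unit_sym(char):
--     """Checks if character `char` is the starting character of a special unit."""
--     return (char == UNIT_OPEN_SYM or char == ALIAS_SYM or \
--             char == SLOT_SYM or char == INTENT_SYM)
-- ===== SOURCE B (Python) =====
-- def next_sub_rule_tokens(tokens):
--     n = len(tokens)
--     i = 0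
--     while i < n:
--         tok = tokens[i]
--         if tok in ('[', '~', '@', '%'):
--             stop = ']'
--         elif tok == '{':
--             stop = '}'
--         else:
--             yield [tok]
--             i += 1
--             continue
--         j = i + 1
--         while j < n and tokens[j] != stop:
--             j += 1
--         if j < n:
--             yield tokens[i:j + 1]
--             i = j + 1
--         else:
--             i = n  # unterminated group: nothing more is yielded
-- ===== Notes on version B (the rewrite author's own statement) =====
-- stated objective: alternative
-- what changed: Replaces A's token-by-token state machine (current buffer, stop char, reading flag) with an index-driven loop that, on seeing an opener, scans ahead for the matching closer and yields the whole slice at once.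
import Mathlib
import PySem

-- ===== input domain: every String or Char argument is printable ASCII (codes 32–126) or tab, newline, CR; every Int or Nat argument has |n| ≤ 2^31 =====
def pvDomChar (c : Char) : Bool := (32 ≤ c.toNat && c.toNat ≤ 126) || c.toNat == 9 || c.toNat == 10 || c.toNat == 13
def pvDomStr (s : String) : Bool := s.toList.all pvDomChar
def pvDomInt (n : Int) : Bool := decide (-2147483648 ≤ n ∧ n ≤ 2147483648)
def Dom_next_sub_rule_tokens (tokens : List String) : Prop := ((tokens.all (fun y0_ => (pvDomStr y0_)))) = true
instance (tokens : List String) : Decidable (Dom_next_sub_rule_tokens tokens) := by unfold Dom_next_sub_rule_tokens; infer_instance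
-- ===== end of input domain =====

-- B replaces A's token-by-token state machine with an index/scan-ahead decomposition: same values, same cost (objective: alternative).
-- ===== PORT A =====
-- State machine: (current_sub_rule, stop_with_char, reading_sub_rule, yielded-so-far)
def pvIsStartUnitSym (token : String) : Bool :=
  token = "[" || token = "~" || token = "@" || token = "%"

def pvAStep (st : List String × Option String × Bool × List (List String)) (token : String) :
    List String × Option String × Bool × List (List String) :=
  let (cur, stop, reading, acc) := st
  if reading then
    if some token = stop then ([], none, false, acc ++ [cur ++ [token]])
    else (cur ++ [token], stop, reading, acc)
  else
    if pvIsStartUnitSym token then (cur ++ [token], some "]", true, acc)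
    else if token = "[" then (cur ++ [token], some "]", true, acc)
    else if token = "{" then (cur ++ [token], some "}", true, acc)
    else (cur, stop, reading, acc ++ [[token]])

def next_sub_rule_tokens (tokens : List String) : List (List String) :=
  (tokens.foldl pvAStep ([], none, false, [])).2.2.2

-- ===== PORT B =====
-- scan for the closing token: returns (group incl. closer, remainder) or none if unterminated
def pvBScan (stop : String) : List String → Option (List String × List String)
  | [] => none
  | t :: rest =>
    if t = stop then some ([t], rest)
    else (pvBScan stop rest).map (fun p => (t :: p.1, p.2))

theorem pvBScan_length {stop : String} : ∀ {l g r : List String},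
    pvBScan stop l = some (g, r) → r.length < l.length := by
  intro l
  induction l with
  | nil => intro g r h; simp [pvBScan] at h
  | cons t rest ih =>
    intro g r h
    simp only [pvBScan] at h
    split at h
    · have hr : rest = r := congrArg Prod.snd (Option.some.inj h)
      simp [← hr]
    · cases hx : pvBScan stop rest with
      | none => rw [hx] at h; simp at h
      | some p =>
        rw [hx] at h
        simp only [Option.map_some] at h
        have hr : p.2 = r := congrArg Prod.snd (Option.some.inj h)
        have hlt : p.2.length < rest.length := ih (by rw [hx])
        rw [← hr]
        exact Nat.lt_succ_of_lt hlt

def pvBGo : List String → List (List String)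
  | [] => []
  | tok :: rest =>
    if tok = "[" ∨ tok = "~" ∨ tok = "@" ∨ tok = "%" then
      match h : pvBScan "]" rest with
      | some (g, r) => (tok :: g) :: pvBGo r
      | none => []
    else if tok = "{" then
      match h : pvBScan "}" rest with
      | some (g, r) => (tok :: g) :: pvBGo r
      | none => []
    else [tok] :: pvBGo rest
termination_by l => l.length
decreasing_by
  · exact Nat.lt_succ_of_lt (pvBScan_length h)
  · exact Nat.lt_succ_of_lt (pvBScan_length h)
  · simp

def next_sub_rule_tokens_alt (tokens : List String) : List (List String) :=
  pvBGo tokens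

-- ===== PRECONDITION & SPEC =====
def Spec_next_sub_rule_tokens (tokens : List String) (out : List (List String)) : Prop := out = next_sub_rule_tokens_alt tokens
instance (tokens : List String) (out : List (List String)) : Decidable (Spec_next_sub_rule_tokens tokens out) := by unfold Spec_next_sub_rule_tokens; infer_instance

-- ===== CLAIM (what is proved, stated in full; the proofs are below) =====
def Claim_equal_next_sub_rule_tokens : Prop := ∀ (tokens : List String), Dom_next_sub_rule_tokens tokens → Spec_next_sub_rule_tokens tokens (next_sub_rule_tokens tokens)

-- ===== LEMMAS AND PROOFS =====

theorem pvFold_char_aux : ∀ (n : ℕ) (rest : List String), rest.length ≤ n →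
    (∀ (acc : List (List String)),
      (rest.foldl pvAStep ([], none, false, acc)).2.2.2 = acc ++ pvBGo rest) ∧
    (∀ (cur : List String) (stop : String) (acc : List (List String)),
      (rest.foldl pvAStep (cur, some stop, true, acc)).2.2.2 =
        acc ++ (match pvBScan stop rest with
          | some (g, r) => (cur ++ g) :: pvBGo r
          | none => [])) := by
  intro n
  induction n with
  | zero =>
    intro rest hlen
    have : rest = [] := List.eq_nil_of_length_eq_zero (Nat.le_zero.mp hlen)
    subst this
    constructor
    · intro acc; simp [List.foldl, pvBGo]
    · intro cur stop acc; simp [List.foldl, pvBScan]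
  | succ n ih =>
    intro rest hlen
    cases rest with
    | nil =>
      constructor
      · intro acc; simp [List.foldl, pvBGo]
      · intro cur stop acc; simp [List.foldl, pvBScan]
    | cons tok rest =>
      have hr : rest.length ≤ n := by simpa using Nat.lt_succ_iff.mp (Nat.lt_of_lt_of_le (by simp) hlen)
      constructor
      · -- state machine not in reading mode
        intro acc
        simp only [List.foldl, pvAStep, Bool.false_eq_true, if_false, List.nil_append]
        by_cases hop : pvIsStartUnitSym tok = true
        · have hop' : tok = "[" ∨ tok = "~" ∨ tok = "@" ∨ tok = "%" := by
            simp [pvIsStartUnitSym] at hop; tauto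
          rw [if_pos hop]
          rw [(ih rest hr).2 [tok] "]" acc]
          rw [pvBGo, if_pos hop']
          cases pvBScan "]" rest with
          | none => simp
          | some p => simp
        · have hop' : ¬ (tok = "[" ∨ tok = "~" ∨ tok = "@" ∨ tok = "%") := by
            simp [pvIsStartUnitSym] at hop; tauto
          have hnb : tok ≠ "[" := by tauto
          rw [if_neg hop, if_neg hnb]
          by_cases hbr : tok = "{"
          · rw [if_pos hbr]
            rw [(ih rest hr).2 [tok] "}" acc]
            rw [pvBGo, if_neg hop', if_pos hbr]
            cases pvBScan "}" rest with
            | none => simp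
            | some p => simp
          · rw [if_neg hbr]
            rw [(ih rest hr).1 (acc ++ [[tok]])]
            rw [pvBGo, if_neg hop', if_neg hbr]
            simp
      · -- state machine in reading mode, looking for the stop token
        intro cur stop acc
        simp only [List.foldl, pvAStep, if_true]
        by_cases hstop : tok = stop
        · subst hstop
          rw [if_pos rfl]
          rw [(ih rest hr).1 (acc ++ [cur ++ [tok]])]
          simp [pvBScan]
        · rw [if_neg (by simpa using hstop)]
          rw [(ih rest hr).2 (cur ++ [tok]) stop acc]
          simp only [pvBScan, if_neg hstop]
          cases pvBScan stop rest with
          | none => simp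
          | some p => simp

theorem pvFold_char (rest : List String) :
    (∀ (acc : List (List String)),
      (rest.foldl pvAStep ([], none, false, acc)).2.2.2 = acc ++ pvBGo rest) ∧
    (∀ (cur : List String) (stop : String) (acc : List (List String)),
      (rest.foldl pvAStep (cur, some stop, true, acc)).2.2.2 =
        acc ++ (match pvBScan stop rest with
          | some (g, r) => (cur ++ g) :: pvBGo r
          | none => [])) :=
  pvFold_char_aux rest.length rest le_rfl

-- ===== VERDICT (by name: the statement is the Claim_ definition above) =====
theorem next_sub_rule_tokens_spec : Claim_equal_next_sub_rule_tokens := by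
  intro tokens _
  unfold Spec_next_sub_rule_tokens next_sub_rule_tokens next_sub_rule_tokens_alt
  simpa using (pvFold_char tokens).1 []
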